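-- pv_equiv track=rewrite | github.com/davidhundia-boop/dt-ops-tools | app_qa/wake_lock_analyzer.py | _count_tier2_signals
-- ===== SOURCE A (Python) =====
-- def _count_tier2_signals(entries: list[str]) -> int:
--     """Count how many Tier 2 qualifying signal patterns appear in *entries*."""
--     signals = 0
--     has_sleep_update = any(
--         "sleep" in e.lower() and "update" in e.lower() for e in entries
--     )
--     has_sleep_set_custom = any(
--         "sleep" in e.lower() and "set" in e.lower()
--         and "set_sleepTimeout" != e  # exclude Unity engine's own setter
--         for e in entries
--     )
--     has_game_state = any(
--         any(kw in e for kw in [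
--             "StartGame", "CreateGame", "PauseGame", "ResumeGame",
--             "ActiveGame", "activeGame", "GameSession", "EnterBattle",
--             "ExitBattle", "GameLogic", "GameMatch",
--         ])
--         for e in entries
--     )
--     if has_sleep_update:
--         signals += 1
--     if has_sleep_set_custom:
--         signals += 1
--     if has_game_state:
--         signals += 1
--     return signals
-- ===== SOURCE B (Python) =====
-- def _count_tier2_signals(entries: list[str]) -> int:
--     """Single pass: update three flags per entry, stop once all are set."""
--     kws = [
--         "StartGame", "CreateGame", "PauseGame", "ResumeGame",
--         "ActiveGame", "activeGame", "GameSession", "EnterBattle",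
--         "ExitBattle", "GameLogic", "GameMatch",
--     ]
--     s_upd = s_set = game = False
--     for e in entries:
--         low = e.lower()
--         s_upd = s_upd or ("sleep" in low and "update" in low)
--         s_set = s_set or ("sleep" in low and "set" in low and "set_sleepTimeout" != e)
--         game = game or any(kw in e for kw in kws)
--         if s_upd and s_set and game:
--             break
--     return s_upd + s_set + game
-- ===== Notes on version B (the rewrite author's own statement) =====
-- stated objective: simpler
-- what changed: Replaces three independent short-circuiting any() scans over entries by one combined loop that lowercases each entry once, maintains three boolean flags, and breaks as soon as all three are set; the result is the sum of the flags.
import Mathlib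
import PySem

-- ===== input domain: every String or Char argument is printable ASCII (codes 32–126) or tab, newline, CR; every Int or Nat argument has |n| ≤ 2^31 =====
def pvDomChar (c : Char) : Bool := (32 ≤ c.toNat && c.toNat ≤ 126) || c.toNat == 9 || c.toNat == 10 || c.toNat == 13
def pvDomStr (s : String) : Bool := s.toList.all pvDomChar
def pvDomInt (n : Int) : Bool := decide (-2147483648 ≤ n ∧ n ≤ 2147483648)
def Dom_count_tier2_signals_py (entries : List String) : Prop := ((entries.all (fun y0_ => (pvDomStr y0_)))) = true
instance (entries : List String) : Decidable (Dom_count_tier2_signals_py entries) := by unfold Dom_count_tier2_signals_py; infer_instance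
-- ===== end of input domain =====

-- B replaces A's three independent any() scans by one combined loop with three flags and an
-- early break; simpler single traversal, same return value.

-- ===== PORT A =====
def tier2Keywords : List String :=
  ["StartGame", "CreateGame", "PauseGame", "ResumeGame",
   "ActiveGame", "activeGame", "GameSession", "EnterBattle",
   "ExitBattle", "GameLogic", "GameMatch"]

def count_tier2_signals_py (entries : List String) : Int :=
  let signals : Int := 0
  let has_sleep_update :=
    entries.any (fun e =>
      PySem.Str.isIn "sleep" (PySem.Str.lower e) && PySem.Str.isIn "update" (PySem.Str.lower e))
  let has_sleep_set_custom :=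
    entries.any (fun e =>
      PySem.Str.isIn "sleep" (PySem.Str.lower e) && PySem.Str.isIn "set" (PySem.Str.lower e)
        && !(("set_sleepTimeout" : String) == e))
  let has_game_state :=
    entries.any (fun e => tier2Keywords.any (fun kw => PySem.Str.isIn kw e))
  let signals := if has_sleep_update then signals + 1 else signals
  let signals := if has_sleep_set_custom then signals + 1 else signals
  let signals := if has_game_state then signals + 1 else signals
  signals

-- ===== PORT B =====
def tier2KeywordsB : List String :=
  ["StartGame", "CreateGame", "PauseGame", "ResumeGame",
   "ActiveGame", "activeGame", "GameSession", "EnterBattle",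
   "ExitBattle", "GameLogic", "GameMatch"]

-- the single loop of Source B: three flag accumulators, early break when all are set
def tier2Loop (s1 s2 s3 : Bool) : List String → Bool × Bool × Bool
  | [] => (s1, s2, s3)
  | e :: rest =>
    let low := PySem.Str.lower e
    let s1' := s1 || (PySem.Str.isIn "sleep" low && PySem.Str.isIn "update" low)
    let s2' := s2 || (PySem.Str.isIn "sleep" low && PySem.Str.isIn "set" low
                        && !(("set_sleepTimeout" : String) == e))
    let s3' := s3 || tier2KeywordsB.any (fun kw => PySem.Str.isIn kw e)
    if s1' && s2' && s3' then (s1', s2', s3') else tier2Loop s1' s2' s3' rest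

def count_tier2_signals_py_alt (entries : List String) : Int :=
  let r := tier2Loop false false false entries
  (if r.1 then (1 : Int) else 0) + (if r.2.1 then 1 else 0) + (if r.2.2 then 1 else 0)

-- ===== PRECONDITION & SPEC =====
def Spec_count_tier2_signals_py (entries : List String) (out : Int) : Prop := out = count_tier2_signals_py_alt entries
instance (entries : List String) (out : Int) : Decidable (Spec_count_tier2_signals_py entries out) := by unfold Spec_count_tier2_signals_py; infer_instance

-- ===== CLAIM (what is proved, stated in full; the proofs are below) =====
def Claim_equal_count_tier2_signals_py : Prop := ∀ (entries : List String), Dom_count_tier2_signals_py entries → Spec_count_tier2_signals_py entries (count_tier2_signals_py entries)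

-- ===== LEMMAS AND PROOFS =====
theorem tier2Loop_eq (l : List String) (s1 s2 s3 : Bool) :
    tier2Loop s1 s2 s3 l =
      (s1 || l.any (fun e =>
          PySem.Str.isIn "sleep" (PySem.Str.lower e) && PySem.Str.isIn "update" (PySem.Str.lower e)),
       s2 || l.any (fun e =>
          PySem.Str.isIn "sleep" (PySem.Str.lower e) && PySem.Str.isIn "set" (PySem.Str.lower e)
            && !(("set_sleepTimeout" : String) == e)),
       s3 || l.any (fun e => tier2KeywordsB.any (fun kw => PySem.Str.isIn kw e))) := by
  induction l generalizing s1 s2 s3 with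
  | nil => simp [tier2Loop]
  | cons e rest ih =>
    simp only [tier2Loop, List.any_cons]
    split_ifs with h
    · rw [Bool.and_eq_true, Bool.and_eq_true] at h
      obtain ⟨⟨h1, h2⟩, h3⟩ := h
      simp only [Prod.mk.injEq, ← Bool.or_assoc]
      rw [h1, h2, h3]
      simp
    · rw [ih]
      simp [Bool.or_assoc]

theorem count_tier2_signals_py_spec : Claim_equal_count_tier2_signals_py := by
  intro entries _
  show count_tier2_signals_py entries = count_tier2_signals_py_alt entries
  simp only [count_tier2_signals_py, count_tier2_signals_py_alt, tier2Loop_eq, Bool.false_or,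
    show tier2KeywordsB = tier2Keywords from rfl]
  cases hA : entries.any (fun e =>
      PySem.Str.isIn "sleep" (PySem.Str.lower e) && PySem.Str.isIn "update" (PySem.Str.lower e)) <;>
    cases hB : entries.any (fun e =>
      PySem.Str.isIn "sleep" (PySem.Str.lower e) && PySem.Str.isIn "set" (PySem.Str.lower e)
        && !(("set_sleepTimeout" : String) == e)) <;>
    cases hC : entries.any (fun e => tier2Keywords.any (fun kw => PySem.Str.isIn kw e)) <;>
    simp [hA, hB, hC]
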